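-- pv_equiv track=rewrite | github.com/haxsokol/power_query_sources | extract_power_query_sources.py | strip_sql_comments
-- ===== SOURCE A (Python) =====
-- def strip_sql_comments(text: str) -> str:
--     if not text:
--         return ""
--
--     result: list[str] = []
--     i = 0
--     in_single = False
--     in_double = False
--     length = len(text)
--
--     while i < length:
--         char = text[i]
--         nxt = text[i + 1] if i + 1 < length else ""
--
--         if in_single:
--             result.append(char)
--             if char == "'" and nxt == "'":
--                 result.append(nxt)
--                 i += 2
--                 continue
--             if char == "'":
--                 in_single = False
--             i += 1
--             continue
--
--         if in_double:
--             result.append(char)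
--             if char == '"' and nxt == '"':
--                 result.append(nxt)
--                 i += 2
--                 continue
--             if char == '"':
--                 in_double = False
--             i += 1
--             continue
--
--         if char == "-" and nxt == "-":
--             i += 2
--             while i < length and text[i] not in "\r\n":
--                 i += 1
--             continue
--
--         if char == "/" and nxt == "*":
--             i += 2
--             while i + 1 < length and not (text[i] == "*" and text[i + 1] == "/"):
--                 i += 1
--             i = i + 2 if i + 1 < length else length
--             continue
--
--         if char == "'":
--             in_single = True
--         elif char == '"':
--             in_double = True
--
--         result.append(char)
--         i += 1
--
--     return "".join(result)
-- ===== SOURCE B (Python) =====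
-- def strip_sql_comments(text: str) -> str:
--     # Token scanner: consumes whole quoted strings / comments per step via str.find,
--     # appending slices, instead of a char-by-char state machine with in-string flags.
--     parts: list[str] = []
--     i, n = 0, len(text)
--     while i < n:
--         c = text[i]
--         if c == "'" or c == '"':
--             j = i + 1
--             while True:
--                 k = text.find(c, j)
--                 if k == -1:
--                     j = n
--                     break
--                 if k + 1 < n and text[k + 1] == c:
--                     j = k + 2
--                 else:
--                     j = k + 1
--                     break
--             parts.append(text[i:j])
--             i = j
--         elif text.startswith("--", i):
--             j = i + 2
--             while j < n and text[j] not in "\r\n":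
--                 j += 1
--             i = j
--         elif text.startswith("/*", i):
--             k = text.find("*/", i + 2)
--             i = n if k == -1 else k + 2
--         else:
--             parts.append(c)
--             i += 1
--     return "".join(parts)
-- ===== Notes on version B (the rewrite author's own statement) =====
-- stated objective: alternative
-- what changed: Replaces the char-by-char state machine with in_single/in_double boolean flags by a token scanner that consumes a whole quoted string or comment per step (using str.find to jump) and appends slices.
import Mathlib
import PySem

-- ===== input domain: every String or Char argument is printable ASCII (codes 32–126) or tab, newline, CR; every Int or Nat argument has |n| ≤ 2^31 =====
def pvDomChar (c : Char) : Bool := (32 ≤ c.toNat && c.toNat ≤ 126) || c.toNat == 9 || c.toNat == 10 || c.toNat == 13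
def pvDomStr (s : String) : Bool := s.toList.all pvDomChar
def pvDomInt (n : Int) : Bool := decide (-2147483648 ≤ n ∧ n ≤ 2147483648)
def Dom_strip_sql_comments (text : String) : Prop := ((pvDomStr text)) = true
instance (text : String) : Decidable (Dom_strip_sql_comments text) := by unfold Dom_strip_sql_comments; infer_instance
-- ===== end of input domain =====

-- B replaces A's char-by-char state machine (in_single/in_double flags) by a token
-- scanner that consumes a whole quoted string or comment per step (alternative, same cost).

-- ===== PORT A =====

-- while i < length and text[i] not in "\r\n": i += 1
def skipLineA (l : List Char) : List Char :=
  l.dropWhile (fun c => !(c = '\r' || c = '\n'))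

-- while i + 1 < length and not (text[i]='*' and text[i+1]='/'): i += 1; then i+2 or length
def skipBlockA : List Char → List Char
  | '*' :: '/' :: r => r
  | _ :: b :: r => skipBlockA (b :: r)
  | _ => []

theorem skipBlockA_le (l : List Char) : (skipBlockA l).length ≤ l.length := by
  fun_induction skipBlockA l <;> simp_all <;> omega

-- the main while loop of A, state = (in_single, in_double), result built front-to-back
def loopA (in_s in_d : Bool) (l : List Char) : List Char :=
  match l with
  | [] => []
  | c :: rest =>
    if in_s then
      if c = '\'' ∧ rest.head? = some '\'' then
        c :: '\'' :: loopA in_s in_d rest.tail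
      else if c = '\'' then c :: loopA false in_d rest
      else c :: loopA in_s in_d rest
    else if in_d then
      if c = '"' ∧ rest.head? = some '"' then
        c :: '"' :: loopA in_s in_d rest.tail
      else if c = '"' then c :: loopA in_s false rest
      else c :: loopA in_s in_d rest
    else if c = '-' ∧ rest.head? = some '-' then loopA in_s in_d (skipLineA rest.tail)
    else if c = '/' ∧ rest.head? = some '*' then loopA in_s in_d (skipBlockA rest.tail)
    else if c = '\'' then c :: loopA true in_d rest
    else if c = '"' then c :: loopA in_s true rest
    else c :: loopA in_s in_d rest
termination_by l.length
decreasing_by all_goals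
  (have ht : rest.tail.length ≤ rest.length := by cases rest <;> simp
   have h1 : (skipLineA rest.tail).length ≤ rest.tail.length := by
     unfold skipLineA; exact List.length_dropWhile_le _ _
   have h2 : (skipBlockA rest.tail).length ≤ rest.tail.length := skipBlockA_le _
   simp only [List.length_cons]
   omega)

def strip_sql_comments (text : String) : String :=
  if text = "" then ""
  else String.ofList (loopA false false text.toList)

-- ===== PORT B =====

-- hand port of B's inner find-loop for a quoted string: given the text after the opening
-- quote, returns (the rest of the string token, remainder of the text); exact char-step
-- rendering of the repeated str.find jumps.
def takeStr (q : Char) : List Char → List Char × List Char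
  | [] => ([], [])
  | c :: rest =>
    if c = q then
      match rest with
      | n :: r2 =>
        if n = q then
          (c :: n :: (takeStr q r2).1, (takeStr q r2).2)
        else ([c], rest)
      | [] => ([c], [])
    else
      (c :: (takeStr q rest).1, (takeStr q rest).2)

theorem takeStr_snd_le (q : Char) (l : List Char) : ((takeStr q l).2).length ≤ l.length := by
  fun_induction takeStr q l <;> simp_all <;> omega

-- B's line-comment scan (the same while loop as in B's Python)
def skipLineB (l : List Char) : List Char :=
  l.dropWhile (fun c => !(c = '\r' || c = '\n'))

-- hand port of text.find("*/", i+2): scan one char at a time for "*/"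
def skipBlockB : List Char → List Char
  | [] => []
  | c :: r => if c = '*' ∧ r.head? = some '/' then r.tail else skipBlockB r

theorem skipBlockB_le (l : List Char) : (skipBlockB l).length ≤ l.length := by
  fun_induction skipBlockB l <;> simp_all <;> omega

-- B's main token loop
def loopB (l : List Char) : List Char :=
  match l with
  | [] => []
  | c :: rest =>
    if c = '\'' ∨ c = '"' then
      c :: ((takeStr c rest).1 ++ loopB (takeStr c rest).2)
    else if c = '-' ∧ rest.head? = some '-' then loopB (skipLineB rest.tail)
    else if c = '/' ∧ rest.head? = some '*' then loopB (skipBlockB rest.tail)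
    else c :: loopB rest
termination_by l.length
decreasing_by all_goals
  (have ht : rest.tail.length ≤ rest.length := by cases rest <;> simp
   have h1 : (skipLineB rest.tail).length ≤ rest.tail.length := by
     unfold skipLineB; exact List.length_dropWhile_le _ _
   have h2 : (skipBlockB rest.tail).length ≤ rest.tail.length := skipBlockB_le _
   have h3 : ((takeStr c rest).2).length ≤ rest.length := takeStr_snd_le _ _
   simp only [List.length_cons]
   omega)

def strip_sql_comments_alt (text : String) : String :=
  String.ofList (loopB text.toList)

-- ===== PRECONDITION & SPEC =====
def Spec_strip_sql_comments (text : String) (out : String) : Prop := out = strip_sql_comments_alt text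
instance (text : String) (out : String) : Decidable (Spec_strip_sql_comments text out) := by unfold Spec_strip_sql_comments; infer_instance

-- ===== CLAIM (what is proved, stated in full; the proofs are below) =====
def Claim_equal_strip_sql_comments : Prop := ∀ (text : String), Dom_strip_sql_comments text → Spec_strip_sql_comments text (strip_sql_comments text)

-- ===== LEMMAS AND PROOFS =====

theorem skipBlockB_short (t : List Char)
    (h : ∀ (a b : Char) (r : List Char), ¬ t = a :: b :: r) : skipBlockB t = [] := by
  match t with
  | [] => simp [skipBlockB]
  | [a] => simp [skipBlockB]
  | a :: b :: r => exact absurd rfl (h a b r)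

theorem skipLine_eq (l : List Char) : skipLineA l = skipLineB l := rfl

theorem skipBlock_eq (l : List Char) : skipBlockA l = skipBlockB l := by
  fun_induction skipBlockA l <;> simp_all [skipBlockB]
  all_goals (rename_i t h; exact skipBlockB_short t h)

theorem loopA_single (l : List Char) :
    loopA true false l = (takeStr '\'' l).1 ++ loopA false false (takeStr '\'' l).2 := by
  fun_induction takeStr '\'' l <;> simp_all [loopA]

theorem loopA_double (l : List Char) :
    loopA false true l = (takeStr '"' l).1 ++ loopA false false (takeStr '"' l).2 := by
  fun_induction takeStr '"' l <;> simp_all [loopA]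

theorem loop_eq (l : List Char) : loopA false false l = loopB l := by
  fun_induction loopB l with
  | case1 => simp [loopA]
  | case2 c rest hq ih =>
    rcases hq with hc | hc <;> subst hc <;>
      rw [loopA] <;> simp_all [loopA_single, loopA_double]
  | case3 c rest hq hdash ih =>
    rw [loopA]
    simp_all [skipLine_eq]
  | case4 c rest hq hdash hslash ih =>
    rw [loopA]
    simp_all [skipBlock_eq]
  | case5 c rest hq hdash hslash ih =>
    rw [loopA]
    push Not at hq
    simp [hdash, hslash, hq.1, hq.2, ih]

-- ===== VERDICT (by name: the statement is the Claim_ definition above) =====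
theorem strip_sql_comments_spec : Claim_equal_strip_sql_comments := by
  intro text _
  unfold Spec_strip_sql_comments strip_sql_comments strip_sql_comments_alt
  split
  · next h => subst h; simp [loopB]
  · rw [loop_eq]
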